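-- pv_equiv track=rewrite | github.com/jahirulislammolla/CodeFights | Fights/ballsDistribution.py | ballsDistribution
-- ===== SOURCE A (Python) =====
-- def ballsDistribution(colors, ballsPerColor, boxSize):
--
--     currentBox = 0
--     capacity = boxSize
--     result = 0
--
--     for i in range(colors):
--         startBox = currentBox
--         for j in range(ballsPerColor):
--             capacity -= 1
--             if capacity == 0:
--                 currentBox += 1
--                 capacity = boxSize
--         if  startBox < currentBox and capacity<boxSize or startBox+1<currentBox:
--             result += 1
--
--     return result
-- ===== SOURCE B (Python) =====
-- def ballsDistribution(colors, ballsPerColor, boxSize):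
--     if colors <= 0 or ballsPerColor <= 0 or boxSize <= 0:
--         return 0
--     result = 0
--     for i in range(colors):
--         total_before = i * ballsPerColor
--         total_after = total_before + ballsPerColor
--         startBox = total_before // boxSize
--         endBox = total_after // boxSize
--         if (startBox < endBox and total_after % boxSize != 0) or startBox + 1 < endBox:
--             result += 1
--     return result
-- ===== Notes on version B (the rewrite author's own statement) =====
-- stated objective: faster
-- what changed: B replaces A's per-ball inner loop with a per-color closed form: the ball total before/after each color gives the start box, end box and leftover via // and %, so the condition is computed in O(1) per color.
import Mathlib
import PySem

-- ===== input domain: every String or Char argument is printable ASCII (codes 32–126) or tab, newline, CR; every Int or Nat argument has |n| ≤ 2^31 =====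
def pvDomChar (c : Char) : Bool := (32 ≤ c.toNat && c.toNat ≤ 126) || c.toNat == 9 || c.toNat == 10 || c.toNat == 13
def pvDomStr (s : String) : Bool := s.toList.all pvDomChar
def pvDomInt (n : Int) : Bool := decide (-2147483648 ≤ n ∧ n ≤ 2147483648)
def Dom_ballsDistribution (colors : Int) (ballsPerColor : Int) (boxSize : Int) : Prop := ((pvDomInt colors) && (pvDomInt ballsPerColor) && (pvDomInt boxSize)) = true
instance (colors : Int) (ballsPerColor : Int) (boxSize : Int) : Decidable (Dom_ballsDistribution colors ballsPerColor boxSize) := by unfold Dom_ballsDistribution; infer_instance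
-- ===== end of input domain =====

-- B replaces A's per-ball simulation with per-color integer division/modulo (asymptotically faster).

-- ===== PORT A =====
def ballsDistribution (colors : Int) (ballsPerColor : Int) (boxSize : Int) : Int :=
  let st := (PySem.List.pyRange 0 colors 1).foldl
    (fun (st : Int × Int × Int) (_i : Int) =>
      let startBox := st.1
      let inner := (PySem.List.pyRange 0 ballsPerColor 1).foldl
        (fun (p : Int × Int) (_j : Int) =>
          let capacity := p.2 - 1
          if capacity = 0 then (p.1 + 1, boxSize) else (p.1, capacity))
        (st.1, st.2.1)
      let result := if (startBox < inner.1 ∧ inner.2 < boxSize) ∨ startBox + 1 < inner.1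
                    then st.2.2 + 1 else st.2.2
      (inner.1, inner.2, result))
    (0, boxSize, 0)
  st.2.2

-- ===== PORT B =====
def ballsDistribution_alt (colors : Int) (ballsPerColor : Int) (boxSize : Int) : Int :=
  if colors ≤ 0 ∨ ballsPerColor ≤ 0 ∨ boxSize ≤ 0 then 0
  else (PySem.List.pyRange 0 colors 1).foldl
    (fun (result : Int) (i : Int) =>
      let totalBefore := i * ballsPerColor
      let totalAfter := totalBefore + ballsPerColor
      let startBox := PySem.Int.floordiv totalBefore boxSize
      let endBox := PySem.Int.floordiv totalAfter boxSize
      if (startBox < endBox ∧ PySem.Int.mod totalAfter boxSize ≠ 0) ∨ startBox + 1 < endBox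
      then result + 1 else result) 0

-- ===== PRECONDITION & SPEC =====
def Spec_ballsDistribution (colors : Int) (ballsPerColor : Int) (boxSize : Int) (out : Int) : Prop := out = ballsDistribution_alt colors ballsPerColor boxSize
instance (colors : Int) (ballsPerColor : Int) (boxSize : Int) (out : Int) : Decidable (Spec_ballsDistribution colors ballsPerColor boxSize out) := by unfold Spec_ballsDistribution; infer_instance

-- ===== CLAIM (what is proved, stated in full; the proofs are below) =====
def Claim_equal_ballsDistribution : Prop := ∀ (colors : Int) (ballsPerColor : Int) (boxSize : Int), Dom_ballsDistribution colors ballsPerColor boxSize → Spec_ballsDistribution colors ballsPerColor boxSize (ballsDistribution colors ballsPerColor boxSize)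

-- ===== LEMMAS AND PROOFS =====

-- a fold whose step ignores the element is an iterate
theorem pvFoldl_const_eq_iterate {α β : Type} (f : α → α) (l : List β) (init : α) :
    l.foldl (fun a _ => f a) init = f^[l.length] init := by
  induction l generalizing init with
  | nil => rfl
  | cons x xs ih => simp [List.foldl_cons, ih, Function.iterate_succ_apply]

-- A's inner per-ball step
def pvInner (boxSize : Int) (p : Int × Int) : Int × Int :=
  let capacity := p.2 - 1
  if capacity = 0 then (p.1 + 1, boxSize) else (p.1, capacity)

theorem pvInner_eq (s q c : Int) :
    pvInner s (q, c) = if c - 1 = 0 then (q + 1, s) else (q, c - 1) := rfl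

theorem pvInner_iter_pos (s : Int) (hs : 0 < s) (n : Nat) :
    ∀ (q r : Int), 0 ≤ r → r < s →
      (pvInner s)^[n] (q, s - r) =
        ((s * q + r + n) / s, s - (s * q + r + n) % s) := by
  induction n with
  | zero =>
    intro q r h0 h1
    have hq : (s * q + r) / s = q := by
      rw [add_comm, Int.add_mul_ediv_left _ _ (by omega : s ≠ 0),
        Int.ediv_eq_zero_of_lt h0 h1]; omega
    have hr : (s * q + r) % s = r := by
      rw [add_comm, Int.add_mul_emod_self_left, Int.emod_eq_of_lt h0 h1]
    simp [hq, hr]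
  | succ n ih =>
    intro q r h0 h1
    rw [Function.iterate_succ_apply, pvInner_eq]
    by_cases hcap : s - r - 1 = 0
    · rw [if_pos hcap]
      have hih := ih (q + 1) 0 le_rfl hs
      rw [show s - (0 : Int) = s from by ring] at hih
      rw [hih]
      have hk : s * (q + 1) + 0 + (n : Int) = s * q + r + ((n + 1 : Nat) : Int) := by
        have hr' : r = s - 1 := by omega
        subst hr'; push_cast; ring
      rw [hk]
    · rw [if_neg hcap]
      have hsr : s - r - 1 = s - (r + 1) := by omega
      rw [hsr, ih q (r + 1) (by omega) (by omega)]
      have hk : s * q + (r + 1) + (n : Int) = s * q + r + ((n + 1 : Nat) : Int) := by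
        push_cast; ring
      rw [hk]

theorem pvInner_iter_nonpos (s : Int) (_hs : s ≤ 0) (n : Nat) :
    ∀ (q cap : Int), cap ≤ 0 →
      (pvInner s)^[n] (q, cap) = (q, cap - n) := by
  induction n with
  | zero => intro q cap _; simp
  | succ n ih =>
    intro q cap hcap
    rw [Function.iterate_succ_apply, pvInner_eq]
    rw [if_neg (show ¬(cap - 1 = 0) by omega)]
    rw [ih q (cap - 1) (by omega)]
    simp only [Prod.mk.injEq]
    exact ⟨trivial, by push_cast; omega⟩

-- A's outer per-color step
def pvOuter (b s : Int) (st : Int × Int × Int) : Int × Int × Int :=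
  let startBox := st.1
  let inner := (PySem.List.pyRange 0 b 1).foldl
    (fun (p : Int × Int) (_j : Int) =>
      let capacity := p.2 - 1
      if capacity = 0 then (p.1 + 1, s) else (p.1, capacity))
    (st.1, st.2.1)
  let result := if (startBox < inner.1 ∧ inner.2 < s) ∨ startBox + 1 < inner.1
                then st.2.2 + 1 else st.2.2
  (inner.1, inner.2, result)

theorem pvOuter_inner_eq_iter (b s : Int) (p : Int × Int) :
    (PySem.List.pyRange 0 b 1).foldl
      (fun (p : Int × Int) (_j : Int) =>
        let capacity := p.2 - 1
        if capacity = 0 then (p.1 + 1, s) else (p.1, capacity)) p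
      = (pvInner s)^[b.toNat] p := by
  rw [show (fun (p : Int × Int) (_j : Int) =>
        let capacity := p.2 - 1
        if capacity = 0 then (p.1 + 1, s) else (p.1, capacity))
      = (fun p (_ : Int) => pvInner s p) from rfl,
    pvFoldl_const_eq_iterate]
  simp [PySem.List.length_pyRange_one]

-- B's per-color step
def pvStepB (b s : Int) (result : Int) (i : Int) : Int :=
  let totalBefore := i * b
  let totalAfter := totalBefore + b
  let startBox := PySem.Int.floordiv totalBefore s
  let endBox := PySem.Int.floordiv totalAfter s
  if (startBox < endBox ∧ PySem.Int.mod totalAfter s ≠ 0) ∨ startBox + 1 < endBox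
  then result + 1 else result

-- main invariant over the number of colors processed, for positive b and s
theorem pvMain (b s : Int) (hb : 0 < b) (hs : 0 < s) (n : Nat) :
    (List.range n).foldl (fun st _ => pvOuter b s st) (0, s, 0) =
      (((n : Int) * b) / s, s - ((n : Int) * b) % s,
        (List.range n).foldl (fun (res : Int) (k : Nat) => pvStepB b s res (k : Int)) 0) := by
  induction n with
  | zero => simp
  | succ n ih =>
    rw [List.range_succ, List.foldl_append, List.foldl_append, ih]
    simp only [List.foldl_cons, List.foldl_nil]
    have hsne : s ≠ 0 := by omega
    set t : Int := (n : Int) * b with ht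
    have hmod0 : 0 ≤ t % s := Int.emod_nonneg t hsne
    have hmods : t % s < s := Int.emod_lt_of_pos t hs
    have hinner : (pvInner s)^[b.toNat] (t / s, s - t % s)
        = ((t + b) / s, s - (t + b) % s) := by
      rw [pvInner_iter_pos s hs b.toNat (t / s) (t % s) hmod0 hmods]
      have h2 : s * (t / s) + t % s + (b.toNat : Int) = t + b := by
        have h3 := Int.mul_ediv_add_emod t s
        omega
      rw [h2]
    unfold pvOuter pvStepB
    simp only [pvOuter_inner_eq_iter, hinner,
      PySem.Int.floordiv_eq_ediv_of_pos hs, PySem.Int.mod_eq_emod_of_pos hs]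
    have hnn : 0 ≤ (t + b) % s := Int.emod_nonneg _ hsne
    simp only [Prod.mk.injEq]
    simp only [ht]
    have hpq : (s - ((n : Int) * b + b) % s < s) ↔ (((n : Int) * b + b) % s ≠ 0) := by
      have hnn2 : 0 ≤ ((n : Int) * b + b) % s := Int.emod_nonneg _ hsne
      omega
    have h1 : (n : Int) * b + b = ((n : Int) + 1) * b := by ring
    refine ⟨?_, ?_, ?_⟩
    · push_cast; rw [h1]
    · push_cast; rw [h1]
    · simp only [hpq]

-- b ≤ 0 : A's outer step is the identity
theorem pvOuter_id (b s : Int) (hb : b ≤ 0) (st : Int × Int × Int) :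
    pvOuter b s st = st := by
  unfold pvOuter
  rw [PySem.List.pyRange_one_eq_nil hb]
  simp

-- s ≤ 0 : A's outer fold keeps box 0 and result 0
theorem pvOuter_nonpos (b s : Int) (hs : s ≤ 0) (l : List Int) :
    ∀ (cap res : Int), cap ≤ 0 →
      (l.foldl (fun st _ => pvOuter b s st) (0, cap, res)).2.2 = res := by
  induction l with
  | nil => intro cap res _; rfl
  | cons x xs ih =>
    intro cap res hcap
    rw [List.foldl_cons]
    have hstep : pvOuter b s (0, cap, res) = (0, cap - (b.toNat : Int), res) := by
      unfold pvOuter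
      rw [pvOuter_inner_eq_iter, pvInner_iter_nonpos s hs b.toNat 0 cap hcap]
      simp
    rw [hstep]
    exact ih (cap - (b.toNat : Int)) res (by omega)

theorem pvPorts_eq (colors ballsPerColor boxSize : Int) :
    ballsDistribution colors ballsPerColor boxSize
      = ballsDistribution_alt colors ballsPerColor boxSize := by
  unfold ballsDistribution ballsDistribution_alt
  by_cases hc : colors ≤ 0
  · rw [PySem.List.pyRange_one_eq_nil hc, if_pos (Or.inl hc)]
    rfl
  · by_cases hb : ballsPerColor ≤ 0
    · rw [if_pos (Or.inr (Or.inl hb))]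
      have : ∀ (l : List Int) (st : Int × Int × Int),
          l.foldl (fun st _ => pvOuter ballsPerColor boxSize st) st = st := by
        intro l
        induction l with
        | nil => intro st; rfl
        | cons x xs ih => intro st; rw [List.foldl_cons, pvOuter_id _ _ hb, ih]
      show ((PySem.List.pyRange 0 colors 1).foldl
        (fun st _ => pvOuter ballsPerColor boxSize st) (0, boxSize, 0)).2.2 = 0
      rw [this]
    · by_cases hsle : boxSize ≤ 0
      · rw [if_pos (Or.inr (Or.inr hsle))]
        show ((PySem.List.pyRange 0 colors 1).foldl
          (fun st _ => pvOuter ballsPerColor boxSize st) (0, boxSize, 0)).2.2 = 0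
        exact pvOuter_nonpos _ _ hsle _ boxSize 0 hsle
      · have hc' : (0 : Int) < colors := by omega
        have hb' : (0 : Int) < ballsPerColor := by omega
        have hs' : (0 : Int) < boxSize := by omega
        rw [if_neg (by simp only [not_or]; exact ⟨hc, hb, hsle⟩)]
        show ((PySem.List.pyRange 0 colors 1).foldl
            (fun st _ => pvOuter ballsPerColor boxSize st) (0, boxSize, 0)).2.2
          = (PySem.List.pyRange 0 colors 1).foldl
              (fun res i => pvStepB ballsPerColor boxSize res i) 0
        rw [PySem.List.pyRange_one 0 colors, List.foldl_map, List.foldl_map]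
        simp only [Int.sub_zero, zero_add]
        rw [pvMain ballsPerColor boxSize hb' hs' colors.toNat]

-- ===== VERDICT (by name: the statement is the Claim_ definition above) =====
theorem ballsDistribution_spec : Claim_equal_ballsDistribution := by
  intro colors ballsPerColor boxSize _
  exact pvPorts_eq colors ballsPerColor boxSize
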